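-- pv_equiv track=rewrite | github.com/BathroomEpiphanies/adventofcode_2017 | 06/solution.py | redistribute_banks
-- ===== SOURCE A (Python) =====
-- def redistribute_banks(banks):
--     blocks = max(banks)
--     index = banks.index(blocks)
--     banks[index] = 0
--     while blocks:
--         index = (index+1)%len(banks)
--         banks[index] += 1
--         blocks -= 1
--     return banks
-- ===== SOURCE B (Python) =====
-- def redistribute_banks(banks):
--     # Divmod closed form: same return value as A (A also mutates its
--     # argument in place; B leaves it untouched and returns a fresh list).
--     n = len(banks)
--     blocks = max(banks)
--     index = banks.index(blocks)
--     q, r = divmod(blocks, n)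
--     return [(0 if i == index else banks[i]) + q
--             + (1 if (i + n - 1 - index) % n < r else 0)
--             for i in range(n)]
-- ===== Notes on version B (the rewrite author's own statement) =====
-- stated objective: alternative
-- what changed: Replaces the one-block-at-a-time while loop by a divmod closed form: every bank gets blocks//n and the first blocks%n banks after the max's index get one extra; B also builds a fresh list instead of mutating the argument.
import Mathlib
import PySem

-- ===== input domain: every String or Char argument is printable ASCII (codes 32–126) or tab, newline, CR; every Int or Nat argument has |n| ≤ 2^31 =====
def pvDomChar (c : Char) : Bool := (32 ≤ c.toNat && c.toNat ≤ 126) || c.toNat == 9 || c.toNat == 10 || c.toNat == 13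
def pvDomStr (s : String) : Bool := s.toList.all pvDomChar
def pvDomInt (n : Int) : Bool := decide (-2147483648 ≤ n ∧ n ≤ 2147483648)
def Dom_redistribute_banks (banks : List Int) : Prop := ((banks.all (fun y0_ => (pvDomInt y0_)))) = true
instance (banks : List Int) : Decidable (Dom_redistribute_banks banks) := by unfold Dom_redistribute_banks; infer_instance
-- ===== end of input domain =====

-- B replaces A's one-block-at-a-time while loop with a divmod closed form; return values
-- agree — note A mutates its argument in place, B does not (the equivalence proved here
-- is about the return value only).

-- ===== PORT A =====
-- A's while loop: one iteration per remaining block; the fuel is the (nonnegative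
-- under Pre_) initial block count.  index is always a valid nonnegative position,
-- so Nat % models Python's % and getD models banks[index'] exactly here.
def pyLoopA : Nat → List Int → Nat → List Int
  | 0, banks, _ => banks
  | b + 1, banks, index =>
    let index' := (index + 1) % banks.length            -- index = (index+1) % len(banks)
    pyLoopA b (banks.set index' (banks.getD index' 0 + 1)) index'   -- banks[index] += 1; blocks -= 1

def redistribute_banks (banks : List Int) : List Int :=
  match PySem.List.max? banks (fun y => y) with
  | none => []                                          -- max([]) raises ValueError; excluded by Pre_
  | some blocks =>
    let index := (PySem.List.index? banks blocks).getD 0  -- always some: blocks ∈ banks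
    pyLoopA blocks.toNat (banks.set index 0) index        -- banks[index] = 0; while blocks: …

-- ===== PORT B =====
def redistribute_banks_alt (banks : List Int) : List Int :=
  let n := banks.length
  match PySem.List.max? banks (fun y => y) with
  | none => []                                          -- max([]) raises ValueError; excluded by Pre_
  | some blocks =>
    let index := (PySem.List.index? banks blocks).getD 0  -- always some: blocks ∈ banks
    let qr := (PySem.Int.divmod? blocks (n : Int)).getD (0, 0)  -- q, r = divmod(blocks, n); n ≥ 1 under Pre_
    (List.range n).map (fun i =>
      (if i = index then 0 else banks.getD i 0)          -- banks[i] with 0 ≤ i < n: getD is exact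
      + qr.1
      + (if PySem.Int.mod ((i : Int) + n - 1 - index) (n : Int) < qr.2 then 1 else 0))

-- ===== PRECONDITION & SPEC =====
-- Pre_ excludes the empty list (max([]) raises ValueError) and banks whose maximum is
-- negative ('while blocks' then never terminates: blocks stays truthy as it is decremented).
def Pre_redistribute_banks (banks : List Int) : Prop := banks ≠ [] ∧ ∃ x ∈ banks, 0 ≤ x
instance (banks : List Int) : Decidable (Pre_redistribute_banks banks) := by unfold Pre_redistribute_banks; infer_instance

def pvWitness_redistribute_banks : List Int := [0, 2, 7, 0]

def Spec_redistribute_banks (banks : List Int) (out : List Int) : Prop := out = redistribute_banks_alt banks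
instance (banks : List Int) (out : List Int) : Decidable (Spec_redistribute_banks banks out) := by unfold Spec_redistribute_banks; infer_instance

-- ===== CLAIM (what is proved, stated in full; the proofs are below) =====
def Claim_equal_redistribute_banks : Prop := ∀ (banks : List Int), Dom_redistribute_banks banks → Pre_redistribute_banks banks → Spec_redistribute_banks banks (redistribute_banks banks)

-- ===== LEMMAS AND PROOFS =====

lemma pvMod_small (X n : Nat) (hn : 0 < n) (h : X < 2 * n) :
    X % n < n ∧ (X % n = X ∨ X % n + n = X) := by
  refine ⟨Nat.mod_lt _ hn, ?_⟩
  rcases Nat.lt_or_ge X n with h' | h'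
  · exact Or.inl (Nat.mod_eq_of_lt h')
  · right; rw [Nat.mod_eq_sub_mod h', Nat.mod_eq_of_lt (by omega)]; omega

lemma pvDivmod_natCast (B n : Nat) (hn : 0 < n) :
    PySem.Int.divmod? (B : Int) (n : Int) = some (((B / n : Nat) : Int), ((B % n : Nat) : Int)) := by
  have h1 := PySem.Int.floordiv_natCast B n
  have h2 := PySem.Int.mod_natCast B n
  simp only [PySem.Int.floordiv, PySem.Int.mod] at h1 h2
  simp [PySem.Int.divmod?, h1, h2]
  omega

lemma pvDiv_closed (B n d : Nat) (hn : 0 < n) (hd : d < n) :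
    (B + n - 1 - d) / n = B / n + (if d < B % n then 1 else 0) := by
  have h1 : n * (B / n) + B % n = B := Nat.div_add_mod B n
  have hr : B % n < n := Nat.mod_lt _ hn
  have harg : B + n - 1 - d = n * (B / n) + (B % n + n - 1 - d) := by omega
  rw [harg, Nat.mul_add_div hn]
  rcases Nat.lt_or_ge d (B % n) with h | h
  · have hle : n ≤ B % n + n - 1 - d := by omega
    rw [Nat.div_eq_sub_div hn hle,
      Nat.div_eq_of_lt (show B % n + n - 1 - d - n < n by omega)]
    simp [h]
  · rw [Nat.div_eq_of_lt (show B % n + n - 1 - d < n by omega)]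
    simp [Nat.not_lt.mpr h]

lemma pyLoopA_length (b : Nat) : ∀ (banks : List Int) (index : Nat),
    (pyLoopA b banks index).length = banks.length := by
  induction b with
  | zero => intro banks index; rfl
  | succ b ih => intro banks index; simp [pyLoopA, ih]

-- each position i ends up with its start value plus the number of the b handed-out
-- blocks that land on it, in closed form
lemma pyLoopA_getD (b : Nat) : ∀ (banks : List Int) (index i : Nat),
    index < banks.length → i < banks.length →
    (pyLoopA b banks index).getD i 0 =
      banks.getD i 0 +
        ((b + banks.length - 1 - ((i + banks.length - 1 - index) % banks.length)) / banks.length : Nat) := by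
  induction b with
  | zero =>
    intro banks index i hidx hi
    have hn : 0 < banks.length := by omega
    obtain ⟨hdlt, -⟩ := pvMod_small (i + banks.length - 1 - index) banks.length hn (by omega)
    rw [pyLoopA]
    rw [Nat.div_eq_of_lt (by omega)]
    simp
  | succ b ih =>
    intro banks index i hidx hi
    set n := banks.length with hnlen
    have hn : 0 < n := by omega
    rw [pyLoopA]
    have hjlt : (index + 1) % n < n := Nat.mod_lt _ hn
    set j := (index + 1) % n with hjdef
    have hlen' : (banks.set j (banks.getD j 0 + 1)).length = n := by simp [hnlen]
    rw [ih (banks.set j (banks.getD j 0 + 1)) j i (by omega) (by omega)]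
    rw [hlen']
    obtain ⟨-, hj2⟩ := pvMod_small (index + 1) n hn (by omega)
    obtain ⟨hd1, hd2⟩ := pvMod_small (i + n - 1 - index) n hn (by omega)
    obtain ⟨hd1', hd2'⟩ := pvMod_small (i + n - 1 - j) n hn (by omega)
    set d := (i + n - 1 - index) % n with hddef
    set d' := (i + n - 1 - j) % n with hd'def
    by_cases hij : i = j
    · -- i receives this block: d = 0, d' = n - 1
      have hd0 : d = 0 := by omega
      have hd'n : d' = n - 1 := by omega
      have hgd : (banks.set j (banks.getD j 0 + 1)).getD i 0 = banks.getD i 0 + 1 := by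
        rw [hij, List.getD_eq_getElem?_getD,
          List.getElem?_set_self (show j < banks.length by omega)]
        rfl
      rw [hgd, hd0, hd'n]
      have e1 : b + n - 1 - (n - 1) = b := by omega
      have e2 : b + 1 + n - 1 - 0 = b + n := by omega
      rw [e1, e2, Nat.add_div_right b hn]
      push_cast; ring
    · -- i untouched this step: d = d' + 1
      have hdd : d = d' + 1 := by omega
      have hgd : (banks.set j (banks.getD j 0 + 1)).getD i 0 = banks.getD i 0 := by
        simp [List.getD_eq_getElem?_getD, List.getElem?_set_ne (fun h => hij h.symm)]
      rw [hgd]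
      have e1 : b + n - 1 - d' = b + 1 + n - 1 - d := by omega
      rw [e1]

-- ===== VERDICT (by name: the statement is the Claim_ definition above) =====
theorem redistribute_banks_spec : Claim_equal_redistribute_banks := by
  intro banks _ hpre
  obtain ⟨hne, x, hxmem, hx0⟩ := hpre
  unfold Spec_redistribute_banks redistribute_banks redistribute_banks_alt
  cases hmax : PySem.List.max? banks (fun y => y) with
  | none => exact absurd ((PySem.List.max?_eq_none_iff banks _).mp hmax) hne
  | some blocks =>
    have hmem : blocks ∈ banks := PySem.List.max?_mem hmax
    have hb0 : (0 : Int) ≤ blocks := le_trans hx0 (PySem.List.max?_isMax hmax x hxmem)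
    obtain ⟨k, hk⟩ := Option.isSome_iff_exists.mp ((PySem.List.index?_isSome_iff banks blocks).mpr hmem)
    obtain ⟨hklt, -, -⟩ := PySem.List.getElem_of_index?_eq_some hk
    set n := banks.length with hnlen
    have hn : 0 < n := by omega
    set B := blocks.toNat with hBdef
    have hBcast : (B : Int) = blocks := Int.toNat_of_nonneg hb0
    simp only [hk, Option.getD_some]
    rw [← hBcast]
    simp only [Int.toNat_natCast, pvDivmod_natCast B n hn, Option.getD_some]
    apply List.ext_getElem
    · simp [pyLoopA_length, hnlen]
    · intro i hi1 hi2
      have hi : i < n := by simpa [pyLoopA_length, hnlen] using hi1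
      have hset_len : (banks.set k 0).length = n := by simp [hnlen]
      have hA : (pyLoopA B (banks.set k 0) k)[i] =
          (banks.set k 0).getD i 0 + ((B + n - 1 - ((i + n - 1 - k) % n)) / n : Nat) := by
        rw [← List.getD_eq_getElem _ 0, pyLoopA_getD B (banks.set k 0) k i (by omega) (by omega), hset_len]
      rw [hA]
      rw [List.getElem_map, List.getElem_range]
      -- the Python modulus argument is the Nat i + n - 1 - k
      have hcast : (i : Int) + n - 1 - k = ((i + n - 1 - k : Nat) : Int) := by push_cast [hnlen] ; omega
      rw [hcast, PySem.Int.mod_natCast]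
      have hgd : (banks.set k 0).getD i 0 = if i = k then 0 else banks.getD i 0 := by
        by_cases h : i = k
        · subst h; simp [List.getD_eq_getElem?_getD, List.getElem?_set_self (by omega : i < banks.length)]
        · simp [List.getD_eq_getElem?_getD, List.getElem?_set_ne (fun hh => h hh.symm), h]
      obtain ⟨hdlt, -⟩ := pvMod_small (i + n - 1 - k) n hn (by omega)
      rw [hgd, pvDiv_closed B n _ hn hdlt]
      have hlt : (((i + n - 1 - k) % n : Nat) : Int) < ((B % n : Nat) : Int) ↔ (i + n - 1 - k) % n < B % n := by
        exact_mod_cast Iff.rfl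
      split_ifs with h1 h2 h3 h4 h5 h6 <;> push_cast <;> omega
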